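-- pv_equiv track=rewrite | github.com/AgileWorksZA/codeqa | test_analysis/test_file.py | complex_function
-- ===== SOURCE A (Python) =====
-- def complex_function(n):
--     result = 0
--     for i in range(n):
--         if i % 2 == 0:
--             result += i
--         elif i % 3 == 0:
--             result += i * 2
--         elif i % 5 == 0:
--             result += i * 3
--         else:
--             result += 1
--     return result
-- ===== SOURCE B (Python) =====
-- def complex_function(n):
--     # Closed form: sum each residue class mod 30 as an arithmetic series (O(1)).
--     if n <= 0:
--         return 0
--     q, rem = divmod(n, 30)
--     total = 0
--     for r in range(30):
--         k = q + (1 if r < rem else 0)          # how many i in [0, n) with i % 30 == r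
--         s = k * r + 15 * k * (k - 1)            # sum of those i
--         if r % 2 == 0:
--             total += s
--         elif r % 3 == 0:
--             total += 2 * s
--         elif r % 5 == 0:
--             total += 3 * s
--         else:
--             total += k
--     return total
-- ===== Notes on version B (the rewrite author's own statement) =====
-- stated objective: faster
-- what changed: Replaced the O(n) loop by a closed-form O(1) computation: each residue class of the branch pattern's period is summed as an arithmetic series with its branch coefficient.
import Mathlib
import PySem

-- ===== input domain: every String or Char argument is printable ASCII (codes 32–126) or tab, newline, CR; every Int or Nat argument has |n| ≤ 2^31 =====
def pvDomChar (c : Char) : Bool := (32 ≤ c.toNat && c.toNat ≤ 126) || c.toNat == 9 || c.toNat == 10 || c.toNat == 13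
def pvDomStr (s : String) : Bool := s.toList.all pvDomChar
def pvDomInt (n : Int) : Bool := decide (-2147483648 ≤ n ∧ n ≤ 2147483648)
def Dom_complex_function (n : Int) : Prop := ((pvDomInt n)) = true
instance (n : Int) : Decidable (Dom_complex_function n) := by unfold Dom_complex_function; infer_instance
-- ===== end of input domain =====

-- B replaces A's O(n) loop by a closed-form sum over the residue classes of the branch pattern's period (one arithmetic series per class); measured asymptotically faster.


-- ===== PORT A =====
def complex_function (n : Int) : Int :=
  (PySem.List.pyRange 0 n 1).foldl
    (fun result i =>
      if PySem.Int.mod i 2 = 0 then result + i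
      else if PySem.Int.mod i 3 = 0 then result + i * 2
      else if PySem.Int.mod i 5 = 0 then result + i * 3
      else result + 1) 0

-- ===== PORT B =====
def complex_function_alt (n : Int) : Int :=
  if n ≤ 0 then 0
  else
    let q := PySem.Int.floordiv n 30
    let rem := PySem.Int.mod n 30
    (PySem.List.pyRange 0 30 1).foldl
      (fun total r =>
        let k := q + (if r < rem then (1 : Int) else 0)
        let s := k * r + 15 * k * (k - 1)
        if PySem.Int.mod r 2 = 0 then total + s
        else if PySem.Int.mod r 3 = 0 then total + 2 * s
        else if PySem.Int.mod r 5 = 0 then total + 3 * s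
        else total + k) 0

-- ===== PRECONDITION & SPEC =====
def Spec_complex_function (n : Int) (out : Int) : Prop := out = complex_function_alt n
instance (n : Int) (out : Int) : Decidable (Spec_complex_function n out) := by unfold Spec_complex_function; infer_instance

-- ===== CLAIM (what is proved, stated in full; the proofs are below) =====
def Claim_equal_complex_function : Prop := ∀ (n : Int), Dom_complex_function n → Spec_complex_function n (complex_function n)

-- ===== LEMMAS AND PROOFS =====

theorem pvMod2 (a : Int) : PySem.Int.mod a 2 = a % 2 := PySem.Int.mod_eq_emod_of_pos (by norm_num)
theorem pvMod3 (a : Int) : PySem.Int.mod a 3 = a % 3 := PySem.Int.mod_eq_emod_of_pos (by norm_num)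
theorem pvMod5 (a : Int) : PySem.Int.mod a 5 = a % 5 := PySem.Int.mod_eq_emod_of_pos (by norm_num)
theorem pvMod30 (a : Int) : PySem.Int.mod a 30 = a % 30 := PySem.Int.mod_eq_emod_of_pos (by norm_num)
theorem pvDiv30 (a : Int) : PySem.Int.floordiv a 30 = a / 30 := PySem.Int.floordiv_eq_ediv_of_pos (by norm_num)

-- A's per-iteration increment
def pvStep (i : Int) : Int :=
  if i % 2 = 0 then i
  else if i % 3 = 0 then i * 2
  else if i % 5 = 0 then i * 3
  else 1

-- B's contribution of residue class r (count k = q + [r < rem])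
def pvG (q rem r : Int) : Int :=
  let k := q + (if r < rem then (1 : Int) else 0)
  let s := k * r + 15 * k * (k - 1)
  if r % 2 = 0 then s
  else if r % 3 = 0 then 2 * s
  else if r % 5 = 0 then 3 * s
  else k

-- B's loop body, abstracted over q, rem
def pvBody (q rem : Int) : Int :=
  (PySem.List.pyRange 0 30 1).foldl
    (fun total r =>
      let k := q + (if r < rem then (1 : Int) else 0)
      let s := k * r + 15 * k * (k - 1)
      if PySem.Int.mod r 2 = 0 then total + s
      else if PySem.Int.mod r 3 = 0 then total + 2 * s
      else if PySem.Int.mod r 5 = 0 then total + 3 * s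
      else total + k) 0

theorem pvFoldlSum (g : Int → Int) : ∀ (l : List Int) (init : Int),
    List.foldl (fun a x => a + g x) init l = init + (l.map g).sum
  | [], init => by simp
  | x :: l, init => by
      simp only [List.foldl_cons, List.map_cons, List.sum_cons, pvFoldlSum g l]
      ring

theorem pvBody_sum (q rem : Int) :
    pvBody q rem = ((PySem.List.pyRange 0 30 1).map (pvG q rem)).sum := by
  have hb : (fun (total r : Int) =>
      let k := q + (if r < rem then (1 : Int) else 0)
      let s := k * r + 15 * k * (k - 1)
      if PySem.Int.mod r 2 = 0 then total + s
      else if PySem.Int.mod r 3 = 0 then total + 2 * s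
      else if PySem.Int.mod r 5 = 0 then total + 3 * s
      else total + k) = fun total r => total + pvG q rem r := by
    funext total r
    simp only [pvG, pvMod2, pvMod3, pvMod5]
    split_ifs <;> ring
  rw [pvBody, hb, pvFoldlSum, zero_add]

theorem pvAlt_pos (n : Int) (h : 0 < n) :
    complex_function_alt n = pvBody (n / 30) (n % 30) := by
  rw [complex_function_alt, if_neg (by omega), pvBody, pvDiv30, pvMod30]

-- class-r contribution grows by exactly A's step at i = 30*q + r when its count goes from q to q+1
theorem pvG_succ (q r : Int) :
    pvG q (r + 1) r = pvG q r r + pvStep (30 * q + r) := by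
  simp only [pvG, pvStep, if_pos (by omega : r < r + 1), if_neg (lt_irrefl r)]
  have e2 : (30 * q + r) % 2 = r % 2 := by omega
  have e3 : (30 * q + r) % 3 = r % 3 := by omega
  have e5 : (30 * q + r) % 5 = r % 5 := by omega
  rw [e2, e3, e5]
  split_ifs <;> ring

theorem pvBody_succ (q rem : Int) (h0 : 0 ≤ rem) (h30 : rem < 30) :
    pvBody q (rem + 1) = pvBody q rem + pvStep (30 * q + rem) := by
  rw [pvBody_sum, pvBody_sum]
  rw [PySem.List.pyRange_one_append 0 rem 30 h0 (by omega),
      PySem.List.pyRange_one_cons (by omega : rem < 30)]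
  simp only [List.map_append, List.map_cons, List.sum_append, List.sum_cons]
  have hpre : (PySem.List.pyRange 0 rem 1).map (pvG q (rem + 1))
      = (PySem.List.pyRange 0 rem 1).map (pvG q rem) := by
    apply List.map_congr_left
    intro r hr
    have := (PySem.List.mem_pyRange_one).mp hr
    simp only [pvG, if_pos (by omega : r < rem + 1), if_pos (by omega : r < rem)]
  have hsuf : (PySem.List.pyRange (rem + 1) 30 1).map (pvG q (rem + 1))
      = (PySem.List.pyRange (rem + 1) 30 1).map (pvG q rem) := by
    apply List.map_congr_left
    intro r hr
    have := (PySem.List.mem_pyRange_one).mp hr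
    simp only [pvG, if_neg (by omega : ¬ r < rem + 1), if_neg (by omega : ¬ r < rem)]
  rw [hpre, hsuf, pvG_succ q rem]
  ring

-- counts don't care whether the wrap is recorded as (q, 30) or (q+1, 0)
theorem pvBody_wrap (q : Int) : pvBody q 30 = pvBody (q + 1) 0 := by
  rw [pvBody_sum, pvBody_sum]
  congr 1
  apply List.map_congr_left
  intro r hr
  have := (PySem.List.mem_pyRange_one).mp hr
  simp only [pvG, if_pos (by omega : r < 30), if_neg (by omega : ¬ r < 0)]
  split_ifs <;> ring

theorem pvAltSucc (m : Int) (hm : 1 ≤ m) :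
    complex_function_alt (m + 1) = complex_function_alt m + pvStep m := by
  rw [pvAlt_pos m (by omega), pvAlt_pos (m + 1) (by omega)]
  have hq : 0 ≤ m / 30 := by positivity
  have hr0 : 0 ≤ m % 30 := Int.emod_nonneg m (by norm_num)
  have hr30 : m % 30 < 30 := Int.emod_lt_of_pos m (by norm_num)
  have hm30 : 30 * (m / 30) + m % 30 = m := by omega
  by_cases hc : m % 30 = 29
  · have h1 : (m + 1) / 30 = m / 30 + 1 := by omega
    have h2 : (m + 1) % 30 = 0 := by omega
    have h3 : pvBody (m / 30) 30 = pvBody (m / 30) 29 + pvStep (30 * (m / 30) + 29) := by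
      have h4 := pvBody_succ (m / 30) 29 (by norm_num) (by norm_num)
      norm_num at h4
      exact h4
    rw [h1, h2, ← pvBody_wrap, h3, show 30 * (m / 30) + 29 = m by omega, hc]
  · have h1 : (m + 1) / 30 = m / 30 := by omega
    have h2 : (m + 1) % 30 = m % 30 + 1 := by omega
    rw [h1, h2, pvBody_succ (m / 30) (m % 30) hr0 hr30, hm30]

theorem pvASucc (m : Int) (hm : 0 ≤ m) :
    complex_function (m + 1) = complex_function m + pvStep m := by
  rw [complex_function, complex_function,
      PySem.List.pyRange_one_succ_right (by omega : (0:Int) ≤ m), List.foldl_append]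
  simp only [List.foldl_cons, List.foldl_nil, pvStep, pvMod2, pvMod3, pvMod5]
  split_ifs <;> ring

theorem pvMain : ∀ (m : Nat), complex_function (m : Int) = complex_function_alt (m : Int) := by
  intro m
  induction m with
  | zero => decide
  | succ k ih =>
      push_cast
      rcases Nat.eq_zero_or_pos k with hk | hk
      · subst hk; decide
      · rw [pvASucc (k : Int) (by positivity), ih,
            pvAltSucc (k : Int) (by exact_mod_cast hk)]

-- ===== VERDICT (by name: the statement is the Claim_ definition above) =====
theorem complex_function_spec : Claim_equal_complex_function := by
  intro n _
  unfold Spec_complex_function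
  by_cases h : n ≤ 0
  · rw [complex_function, PySem.List.pyRange_one_eq_nil h, List.foldl_nil,
        complex_function_alt, if_pos h]
  · have := pvMain n.toNat
    rwa [Int.toNat_of_nonneg (by omega)] at this
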